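-- pv_equiv track=rewrite | github.com/connorjones1991/masters-betting | masters.py | assign_bettors
-- ===== SOURCE A (Python) =====
-- def assign_bettors(bettors_names, blocks):
--     """
--     Assigns golfers to bettors.
--
--     Parameters
--     ----------
--     bettors_names : str
--         String seperated by ', .
--     blocks : nested list
--         Nested list of golfers.
--     Returns
--     -------
--     Golfers that are assigned to bettors as dict.
--
--     """
--     bettors = bettors_names.split(', ')
--
--     golfers = []
--     for x in range(0, len(blocks[0])):
--         for block in blocks:
--             golfers.append(block[x])
--
--     bettors_golfers = {}
--     x = 0
--     for bettor in bettors: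
--         bettors_golfers[bettor] = golfers[0+x : len(blocks)+x]
--         x += len(blocks)
--     return bettors_golfers
-- ===== SOURCE B (Python) =====
-- def assign_bettors(bettors_names, blocks):
--     bettors = bettors_names.split(', ')
--     columns = [list(col) for col in zip(*blocks)]
--     return dict(zip(bettors, columns))
-- ===== Notes on version B (the rewrite author's own statement) =====
-- stated objective: simpler
-- what changed: B transposes the blocks with zip(*blocks) and pairs bettors with columns via dict(zip(...)), replacing A's column-wise flatten into one list followed by index-arithmetic slicing (skipping the flattened intermediate list and the per-bettor slice copies); Pre_ excludes inputs where A raises IndexError (empty or ragged blocks) and the under-specified corner with more bettors than columns, where A's leftover empty-list entries and B's omission of the surplus bettors are both defensible.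
-- outside the precondition, e.g. on assign_bettors('A, B', [['x']]): A returns {'A': ['x'], 'B': []}, B returns {'A': ['x']}
import Mathlib
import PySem

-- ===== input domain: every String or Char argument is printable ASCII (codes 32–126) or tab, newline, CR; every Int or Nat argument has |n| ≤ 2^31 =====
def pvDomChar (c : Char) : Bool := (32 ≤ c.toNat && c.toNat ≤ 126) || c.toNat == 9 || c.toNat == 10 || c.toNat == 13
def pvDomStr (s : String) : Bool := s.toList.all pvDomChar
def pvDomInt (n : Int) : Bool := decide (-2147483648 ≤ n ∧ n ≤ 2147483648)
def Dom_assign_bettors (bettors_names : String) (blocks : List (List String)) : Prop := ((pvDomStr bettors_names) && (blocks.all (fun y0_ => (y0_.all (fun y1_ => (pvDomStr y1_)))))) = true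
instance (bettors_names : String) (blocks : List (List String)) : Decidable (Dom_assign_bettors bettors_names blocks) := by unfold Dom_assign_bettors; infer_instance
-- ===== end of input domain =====

-- B transposes the blocks (zip(*blocks)) and pairs bettors with columns directly, replacing A's flatten-then-slice pipeline (objective: simpler).

-- ===== PORT A =====
def assign_bettors (bettors_names : String) (blocks : List (List String)) : List (String × List String) :=
  let bettors := (PySem.Str.split? bettors_names ", ").getD []   -- split? is exact for the non-empty separator ', '
  let golfers : List String :=
    (PySem.List.pyRange 0 (((PySem.List.pyGetD blocks 0 []).length : Int)) 1).foldl
      (fun acc x => blocks.foldl (fun acc2 block => acc2 ++ [PySem.List.pyGetD block x ""]) acc) []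
      -- block[x]: pyGetD is exact here since inside Pre_ every index x < len(blocks[0]) ≤ len(block)
  let st := bettors.foldl
    (fun (st : PySem.Dict String (List String) × Int) bettor =>
      (st.1.insert bettor (PySem.List.slice golfers (some (0 + st.2)) (some ((blocks.length : Int) + st.2))),
       st.2 + (blocks.length : Int)))
    (PySem.Dict.empty, 0)
  st.1.items

-- ===== PORT B =====
-- hand port of zip(*blocks): column i is [b[i] for b in blocks], for every i below the shortest block length; exact (zip truncates to the shortest iterable, zip() of no arguments is empty)
def pyColumns (blocks : List (List String)) : List (List String) :=
  (List.range (((blocks.map List.length).min?).getD 0)).map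
    (fun i => blocks.map (fun b => b.getD i ""))

def assign_bettors_alt (bettors_names : String) (blocks : List (List String)) : List (String × List String) :=
  let bettors := (PySem.Str.split? bettors_names ", ").getD []   -- split? is exact for the non-empty separator ', '
  (PySem.Dict.ofList (bettors.zip (pyColumns blocks))).items

-- ===== PRECONDITION & SPEC =====
-- Pre_ excludes exactly (a) the inputs on which A raises IndexError — blocks = [] (blocks[0]) and ragged blocks with some block shorter than blocks[0] — and (b) the under-specified corner with more bettors than columns, where A's leftover empty-list entries for the surplus bettors and B's omission of them are both defensible readings.
def Pre_assign_bettors (bettors_names : String) (blocks : List (List String)) : Prop :=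
  blocks ≠ [] ∧ (∀ b ∈ blocks, (blocks.headD []).length ≤ b.length) ∧
  ((PySem.Str.split? bettors_names ", ").getD []).length ≤ (blocks.headD []).length
instance (bettors_names : String) (blocks : List (List String)) : Decidable (Pre_assign_bettors bettors_names blocks) := by unfold Pre_assign_bettors; infer_instance
def pvWitness_assign_bettors : String × List (List String) :=
  ("Ann, Bob", [["t1", "t2"], ["u1", "u2"]])
def Spec_assign_bettors (bettors_names : String) (blocks : List (List String)) (out : List (String × List String)) : Prop := out = assign_bettors_alt bettors_names blocks
instance (bettors_names : String) (blocks : List (List String)) (out : List (String × List String)) : Decidable (Spec_assign_bettors bettors_names blocks out) := by unfold Spec_assign_bettors; infer_instance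

-- ===== CLAIM (what is proved, stated in full; the proofs are below) =====
def Claim_equal_assign_bettors : Prop := ∀ (bettors_names : String) (blocks : List (List String)), Dom_assign_bettors bettors_names blocks → Pre_assign_bettors bettors_names blocks → Spec_assign_bettors bettors_names blocks (assign_bettors bettors_names blocks)

-- ===== LEMMAS AND PROOFS =====

-- the column function both programs compute
def pvCol (blocks : List (List String)) (j : Nat) : List String :=
  blocks.map (fun b => b.getD j "")

theorem pvCol_length (blocks : List (List String)) (j : Nat) :
    (pvCol blocks j).length = blocks.length := by simp [pvCol]

-- under Pre_, the shortest block is blocks[0], so B's column count is blocks[0].length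
theorem pvMin_eq (b0 : List String) (rest : List (List String))
    (h : ∀ b ∈ (b0 :: rest), b0.length ≤ b.length) :
    (((b0 :: rest).map List.length).min?).getD 0 = b0.length := by
  have hm : ((b0 :: rest).map List.length).min? = some b0.length := by
    rw [List.min?_eq_some_iff]
    refine ⟨List.mem_map_of_mem (List.mem_cons_self ..), ?_⟩
    intro b hb
    rcases List.mem_map.mp hb with ⟨x, hx, rfl⟩
    exact h x hx
  rw [hm]; rfl

-- A's golfers list is the concatenation of the columns
theorem pvGolfers_eq (blocks : List (List String)) (cols : Nat) :
    (PySem.List.pyRange 0 (cols : Int) 1).foldl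
      (fun acc x => blocks.foldl (fun acc2 block => acc2 ++ [PySem.List.pyGetD block x ""]) acc) []
    = (List.range cols).flatMap (pvCol blocks) := by
  have hin : ∀ (j : Nat) (acc : List String),
      blocks.foldl (fun acc2 block => acc2 ++ [PySem.List.pyGetD block (j : Int) ""]) acc
        = acc ++ pvCol blocks j := by
    intro j acc
    rw [PySem.List.foldl_append_singleton_eq_map]
    simp [pvCol, PySem.List.pyGetD_natCast]
  rw [PySem.List.pyRange_zero_natCast, List.foldl_map]
  simp only [hin]
  rw [PySem.List.foldl_append_eq_flatMap]
  rfl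

theorem pvDropChunks (blocks : List (List String)) (cols : Nat) :
    ∀ i, i ≤ cols →
    (((List.range cols).flatMap (pvCol blocks)).drop (blocks.length * i))
      = (List.range' i (cols - i)).flatMap (pvCol blocks) := by
  intro i
  induction i with
  | zero => intro _; simp [List.range_eq_range']
  | succ i ih =>
    intro h
    have hmul : blocks.length * (i + 1) = blocks.length * i + blocks.length := by ring
    rw [hmul, ← List.drop_drop, ih (by omega)]
    have hr : cols - i = (cols - (i + 1)) + 1 := by omega
    rw [hr, List.range'_succ, List.flatMap_cons, List.drop_left' (pvCol_length blocks i)]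

theorem pvChunk (blocks : List (List String)) (cols i : Nat) (h : i < cols) :
    ((((List.range cols).flatMap (pvCol blocks)).drop (blocks.length * i)).take blocks.length)
      = pvCol blocks i := by
  rw [pvDropChunks blocks cols i (le_of_lt h)]
  have hr : cols - i = (cols - (i + 1)) + 1 := by omega
  rw [hr, List.range'_succ, List.flatMap_cons, List.take_left' (pvCol_length blocks i)]

-- the two dictionary-building folds agree, column by column
theorem pvFold_eq (blocks : List (List String)) (cols : Nat)
    (golfers : List String) (hg : golfers = (List.range cols).flatMap (pvCol blocks)) :
    ∀ (bs : List String) (k : Nat) (d : PySem.Dict String (List String)),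
      k + bs.length ≤ cols →
      (bs.foldl
        (fun (st : PySem.Dict String (List String) × Int) bettor =>
          (st.1.insert bettor (PySem.List.slice golfers (some (0 + st.2)) (some ((blocks.length : Int) + st.2))),
           st.2 + (blocks.length : Int)))
        (d, ((blocks.length * k : Nat) : Int))).1
      = (bs.zip ((List.range' k (cols - k)).map (pvCol blocks))).foldl
          (fun d p => d.insert p.1 p.2) d := by
  intro bs
  induction bs with
  | nil => intro k d _; simp
  | cons b bs ih =>
    intro k d hk
    have hkc : k < cols := by simp only [List.length_cons] at hk; omega
    have hv : PySem.List.slice golfers (some (0 + ((blocks.length * k : Nat) : Int)))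
        (some ((blocks.length : Int) + ((blocks.length * k : Nat) : Int))) = pvCol blocks k := by
      have h1 : (0 : Int) + ((blocks.length * k : Nat) : Int) = ((blocks.length * k : Nat) : Int) := by ring
      have h2 : ((blocks.length : Int) + ((blocks.length * k : Nat) : Int))
          = ((blocks.length * k : Nat) : Int) + ((blocks.length : Nat) : Int) := by push_cast; ring
      rw [h1, h2, PySem.List.slice_natCast_add, hg]
      exact pvChunk blocks cols k hkc
    have hc : ((blocks.length * k : Nat) : Int) + (blocks.length : Int)
        = ((blocks.length * (k + 1) : Nat) : Int) := by push_cast; ring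
    have hr : cols - k = (cols - (k + 1)) + 1 := by omega
    simp only [List.foldl_cons, hv, hc]
    rw [hr, List.range'_succ, List.map_cons, List.zip_cons_cons, List.foldl_cons]
    exact ih (k + 1) (d.insert b (pvCol blocks k)) (by simp only [List.length_cons] at hk; omega)

-- ===== VERDICT (by name: the statement is the Claim_ definition above) =====
theorem assign_bettors_spec : Claim_equal_assign_bettors := by
  intro bn blocks _ hpre
  obtain ⟨hne, hrag, hlen⟩ := hpre
  obtain ⟨b0, rest, rfl⟩ : ∃ b0 rest, blocks = b0 :: rest := by
    cases blocks with
    | nil => exact absurd rfl hne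
    | cons a l => exact ⟨a, l, rfl⟩
  show assign_bettors bn (b0 :: rest) = assign_bettors_alt bn (b0 :: rest)
  simp only [assign_bettors, assign_bettors_alt, pyColumns]
  have h0 : PySem.List.pyGetD (b0 :: rest) 0 ([] : List String) = b0 := by
    simp [PySem.List.pyGetD, PySem.List.pyIdx?, PySem.List.pyGet?]
  have hmin := pvMin_eq b0 rest hrag
  have hgol := pvGolfers_eq (b0 :: rest) b0.length
  have hfold := pvFold_eq (b0 :: rest) b0.length _ rfl
      ((PySem.Str.split? bn ", ").getD []) 0 PySem.Dict.empty
      (by simpa using hlen)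
  simp only [h0, hmin, hgol] at *
  have h00 : (((b0 :: rest).length * 0 : Nat) : Int) = (0 : Int) := by simp
  rw [h00] at hfold
  rw [hfold]
  have : PySem.Dict.ofList
      (((PySem.Str.split? bn ", ").getD []).zip
        ((List.range b0.length).map (fun i => (b0 :: rest).map (fun b => b.getD i ""))))
      = (((PySem.Str.split? bn ", ").getD []).zip
        ((List.range' 0 (b0.length - 0)).map (pvCol (b0 :: rest)))).foldl
          (fun d p => d.insert p.1 p.2) PySem.Dict.empty := by
    simp only [Nat.sub_zero, ← List.range_eq_range']
    rfl
  rw [this]
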